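-- pv_equiv track=rewrite | github.com/frozstone/concept | lib/query_math.py | get_op_arg_unif
-- ===== SOURCE A (Python) =====
-- def get_op_arg_unif(paths):
--     ops = []
--     ops_unif = []
--     args = []
--     for p in paths:
--         elem = p.split()
--         op = ""
--         op_unif = ""
--         arg = ""
--         for el in elem:
--             if el.startswith("mo#") or "#mo#" in el:
--                 op = ("%s %s" % (op, el)).strip()
--                 op_unif = ("%s %s" % (op_unif, el)).strip()
--                 continue
--             if el.startswith("mi#") or "#mi#" in el or el.startswith("mn#") or "#mn#" in el:
--                 arg = ("%s %s" % (arg, el)).strip()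
--                 cells = el.split("#")
--                 if cells[-2] == "mi":
--                     unif_concat = "#".join(cells[:-1])
--                     op_unif = ("%s %s" % (op_unif, unif_concat)).strip()
--                 continue
--             op = ("%s %s" % (op, el)).strip()
--             op_unif = ("%s %s"  % (op_unif, el)).strip()
--             arg= ("%s %s" % (arg, el)).strip()
--         if op.strip() != "": ops.append(op)
--         if op_unif.strip() != "": ops_unif.append(op_unif)
--         if arg.strip() != "": args.append(arg)
--     return ops, ops_unif, args
-- ===== SOURCE B (Python) =====
-- def _is_op(t):
--     return t.startswith("mo#") or "#mo#" in t
--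
-- def _is_arg(t):
--     return t.startswith("mi#") or "#mi#" in t or t.startswith("mn#") or "#mn#" in t
--
-- def _unif_piece(t):
--     if _is_op(t):
--         return t
--     if _is_arg(t):
--         cells = t.split("#")
--         if cells[-2] == "mi":
--             return "#".join(cells[:-1])
--         return None
--     return t
--
-- def get_op_arg_unif(paths):
--     op_strs = (" ".join(t for t in p.split() if _is_op(t) or not _is_arg(t)) for p in paths)
--     unif_strs = (" ".join(u for u in map(_unif_piece, p.split()) if u is not None) for p in paths)
--     arg_strs = (" ".join(t for t in p.split() if not _is_op(t)) for p in paths)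
--     return ([s for s in op_strs if s],
--             [s for s in unif_strs if s],
--             [s for s in arg_strs if s])
-- ===== Notes on version B (the rewrite author's own statement) =====
-- stated objective: alternative
-- what changed: B computes each path's op/op_unif/arg strings by three independent filtered passes over the tokens (filter/filterMap then ' '.join) and builds the result lists with comprehensions, instead of A's single interleaved loop that strip-accumulates three strings token by token.
import Mathlib
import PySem

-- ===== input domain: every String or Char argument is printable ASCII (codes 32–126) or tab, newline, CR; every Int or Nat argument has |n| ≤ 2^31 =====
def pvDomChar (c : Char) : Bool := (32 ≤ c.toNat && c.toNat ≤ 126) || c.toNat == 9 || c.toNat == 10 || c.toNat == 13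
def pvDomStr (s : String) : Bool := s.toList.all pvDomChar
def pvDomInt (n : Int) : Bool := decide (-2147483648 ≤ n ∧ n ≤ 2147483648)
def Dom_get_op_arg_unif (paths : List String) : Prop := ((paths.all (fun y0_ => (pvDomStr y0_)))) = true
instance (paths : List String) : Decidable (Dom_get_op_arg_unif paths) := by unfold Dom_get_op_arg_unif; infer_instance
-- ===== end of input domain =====

-- B computes each path's three output strings by independent filtered passes ("join of filter")
-- instead of A's single interleaved loop over three strip-accumulated strings (same cost, different decomposition).

-- ===== PORT A =====
-- '%s %s' % (a, b)  — exact: the two strings with a single space between them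
def pvFmt (a b : String) : String := String.ofList (a.toList ++ ' ' :: b.toList)

-- body of A's inner 'for el in elem' loop; state = (op, op_unif, arg)
def pvStepA (st : String × String × String) (el : String) : String × String × String :=
  match st with
  | (op, op_unif, arg) =>
    if PySem.Str.startswith el "mo#" || PySem.Str.isIn "#mo#" el then
      (PySem.Str.strip (pvFmt op el), PySem.Str.strip (pvFmt op_unif el), arg)
    else if PySem.Str.startswith el "mi#" || PySem.Str.isIn "#mi#" el
            || PySem.Str.startswith el "mn#" || PySem.Str.isIn "#mn#" el then
      let arg' := PySem.Str.strip (pvFmt arg el)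
      let cells := (PySem.Str.split? el "#").getD []   -- el.split("#"); "#" ≠ "" so split? is some
      -- cells[-2]: whenever this branch runs, el contains '#', so len(cells) ≥ 2 and pyGetD is exact
      if PySem.List.pyGetD cells (-2) "" = "mi" then
        (op, PySem.Str.strip (pvFmt op_unif
              (PySem.Str.join "#" (PySem.List.slice cells none (some (-1))))), arg')
      else (op, op_unif, arg')
    else
      (PySem.Str.strip (pvFmt op el), PySem.Str.strip (pvFmt op_unif el),
       PySem.Str.strip (pvFmt arg el))

def get_op_arg_unif (paths : List String) : List String × List String × List String :=
  paths.foldl (fun acc p =>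
    match acc with
    | (ops, ops_unif, args) =>
      match (PySem.Str.split₀ p).foldl pvStepA ("", "", "") with
      | (op, op_unif, arg) =>
        (if PySem.Str.strip op ≠ "" then ops ++ [op] else ops,
         if PySem.Str.strip op_unif ≠ "" then ops_unif ++ [op_unif] else ops_unif,
         if PySem.Str.strip arg ≠ "" then args ++ [arg] else args))
    ([], [], [])

-- ===== PORT B =====
def pvIsOp (t : String) : Bool := PySem.Str.startswith t "mo#" || PySem.Str.isIn "#mo#" t

def pvIsArg (t : String) : Bool :=
  PySem.Str.startswith t "mi#" || PySem.Str.isIn "#mi#" t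
    || PySem.Str.startswith t "mn#" || PySem.Str.isIn "#mn#" t

def pvUnifPiece (t : String) : Option String :=
  if pvIsOp t then some t
  else if pvIsArg t then
    let cells := (PySem.Str.split? t "#").getD []
    if PySem.List.pyGetD cells (-2) "" = "mi" then
      some (PySem.Str.join "#" (PySem.List.slice cells none (some (-1))))
    else none
  else some t

def pvOpStr (p : String) : String :=
  PySem.Str.join " " ((PySem.Str.split₀ p).filter (fun t => pvIsOp t || !pvIsArg t))

def pvUnifStr (p : String) : String :=
  PySem.Str.join " " ((PySem.Str.split₀ p).filterMap pvUnifPiece)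

def pvArgStr (p : String) : String :=
  PySem.Str.join " " ((PySem.Str.split₀ p).filter (fun t => !pvIsOp t))

def get_op_arg_unif_alt (paths : List String) : List String × List String × List String :=
  (paths.filterMap (fun p => if pvOpStr p = "" then none else some (pvOpStr p)),
   paths.filterMap (fun p => if pvUnifStr p = "" then none else some (pvUnifStr p)),
   paths.filterMap (fun p => if pvArgStr p = "" then none else some (pvArgStr p)))

-- ===== PRECONDITION & SPEC =====
def Spec_get_op_arg_unif (paths : List String) (out : List String × List String × List String) : Prop := out = get_op_arg_unif_alt paths
instance (paths : List String) (out : List String × List String × List String) : Decidable (Spec_get_op_arg_unif paths out) := by unfold Spec_get_op_arg_unif; infer_instance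

-- ===== CLAIM (what is proved, stated in full; the proofs are below) =====
def Claim_equal_get_op_arg_unif : Prop := ∀ (paths : List String), Dom_get_op_arg_unif paths → Spec_get_op_arg_unif paths (get_op_arg_unif paths)

-- ===== LEMMAS AND PROOFS =====
def pvClean (s : String) : Prop := ∀ c ∈ s.toList, PySem.Chars.isspace c = false
-- first and last characters (if any) are not whitespace
def pvEnds (s : String) : Prop :=
  (∀ c, s.toList.head? = some c → PySem.Chars.isspace c = false) ∧
  (∀ c, s.toList.getLast? = some c → PySem.Chars.isspace c = false)
def pvG (s t : String) : String := if s = "" then t else pvFmt s t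

lemma pv_toList_eq_nil {s : String} : s.toList = [] ↔ s = "" := by
  constructor
  · intro h; apply String.toList_inj.mp; simpa using h
  · intro h; simp [h]

lemma pv_clean_ends {s : String} (h : pvClean s) : pvEnds s := by
  constructor
  · intro c hc; exact h c (List.mem_of_mem_head? hc)
  · intro c hc; exact h c (List.mem_of_mem_getLast? hc)

lemma pv_lstrip_of_head {l : List Char} (hne : l ≠ [])
    (h : PySem.Chars.isspace (l.head hne) = false) :
    List.dropWhile PySem.Chars.isspace l = l := by
  cases l with
  | nil => rfl
  | cons x xs => rw [List.dropWhile_cons_of_neg]; simp_all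

lemma pv_rstrip_of_last {l : List Char} (hne : l ≠ [])
    (h : PySem.Chars.isspace (l.getLast hne) = false) :
    PySem.Chars.rstrip l = l := by
  unfold PySem.Chars.rstrip
  have hrne : l.reverse ≠ [] := by simpa using hne
  cases hr : l.reverse with
  | nil => exact absurd hr hrne
  | cons z zs =>
    have hz : z = l.getLast hne := by
      have := @List.head?_reverse _ l
      rw [hr] at this
      simp [List.getLast?_eq_getLast_of_ne_nil hne] at this
      exact this
    rw [List.dropWhile_cons_of_neg (by rw [hz]; simp [h])]
    rw [← hr, List.reverse_reverse]

lemma pv_strip_chars_ends {l : List Char} (hne : l ≠ [])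
    (hhead : PySem.Chars.isspace (l.head hne) = false)
    (hlast : PySem.Chars.isspace (l.getLast hne) = false) :
    PySem.Chars.strip l = l := by
  unfold PySem.Chars.strip PySem.Chars.lstrip
  rw [pv_lstrip_of_head hne hhead, pv_rstrip_of_last hne hlast]

lemma pv_strip_ends {s : String} (h : pvEnds s) : PySem.Str.strip s = s := by
  apply String.toList_inj.mp
  rw [PySem.Str.toList_strip]
  by_cases h0 : s = ""
  · subst h0; rfl
  · have hne : s.toList ≠ [] := fun hh => h0 (pv_toList_eq_nil.mp hh)
    exact pv_strip_chars_ends hne (h.1 _ (List.head?_eq_some_head hne)) (h.2 _ (List.getLast?_eq_some_getLast hne))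

lemma pv_fmt_ne (a b : String) : pvFmt a b ≠ "" := by simp [pvFmt]

lemma pv_strip_fmt {a b : String} (ha : pvEnds a) (hb : pvEnds b) (hb0 : b ≠ "") :
    PySem.Str.strip (pvFmt a b) = pvG a b := by
  apply String.toList_inj.mp
  rw [PySem.Str.toList_strip]
  have hbl : b.toList ≠ [] := fun h => hb0 (pv_toList_eq_nil.mp h)
  unfold pvG
  by_cases h0 : a = ""
  · subst h0
    rw [if_pos rfl]
    simp only [pvFmt, String.toList_ofList, String.toList_empty, List.nil_append]
    unfold PySem.Chars.strip PySem.Chars.lstrip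
    rw [List.dropWhile_cons_of_pos (by decide)]
    rw [pv_lstrip_of_head hbl (hb.1 _ (List.head?_eq_some_head hbl)),
        pv_rstrip_of_last hbl (hb.2 _ (List.getLast?_eq_some_getLast hbl))]
  · have hal : a.toList ≠ [] := fun h => h0 (pv_toList_eq_nil.mp h)
    rw [if_neg h0]
    simp only [pvFmt, String.toList_ofList]
    have hne : a.toList ++ ' ' :: b.toList ≠ [] := by simp
    rw [pv_strip_chars_ends hne ?_ ?_]
    · rw [List.head_append_of_ne_nil hal]
      exact ha.1 _ (List.head?_eq_some_head hal)
    · rw [List.getLast_append_of_ne_nil hne (by simp : ' ' :: b.toList ≠ [])]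
      rw [List.getLast_cons hbl]
      exact hb.2 _ (List.getLast?_eq_some_getLast hbl)

lemma pv_g_ends {s t : String} (hs : pvEnds s) (ht : pvEnds t) (ht0 : t ≠ "") : pvEnds (pvG s t) := by
  unfold pvG
  by_cases h0 : s = ""
  · simpa [h0] using ht
  · rw [if_neg h0]
    have hal : s.toList ≠ [] := fun h => h0 (pv_toList_eq_nil.mp h)
    have hbl : t.toList ≠ [] := fun h => ht0 (pv_toList_eq_nil.mp h)
    have htl : (pvFmt s t).toList = s.toList ++ ' ' :: t.toList := by simp [pvFmt]
    constructor
    · intro c hc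
      rw [htl, List.head?_append, List.head?_eq_some_head hal] at hc
      simp only [Option.some_or] at hc
      exact hs.1 c (by rw [List.head?_eq_some_head hal, hc])
    · intro c hc
      rw [htl, List.getLast?_append] at hc
      rw [List.getLast?_cons, List.getLast?_eq_some_getLast hbl] at hc
      simp only [Option.getD_some, Option.some_or] at hc
      exact ht.2 c (by rw [List.getLast?_eq_some_getLast hbl, hc])

lemma pv_split₀_go_clean :
    ∀ (s cur acc : _),
    (∀ t ∈ acc, t ≠ [] ∧ ∀ c ∈ t, PySem.Chars.isspace c = false) →
    (∀ c ∈ cur, PySem.Chars.isspace c = false) →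
    ∀ t ∈ PySem.Chars.split₀.go s cur acc, t ≠ [] ∧ ∀ c ∈ t, PySem.Chars.isspace c = false := by
  intro s
  induction s with
  | nil =>
    intro cur acc hacc hcur t ht
    rw [PySem.Chars.split₀.go] at ht
    by_cases hc : cur.isEmpty
    · rw [if_pos hc] at ht
      exact hacc t (by simpa using ht)
    · rw [if_neg hc] at ht
      simp only [List.mem_reverse, List.mem_cons] at ht
      rcases ht with h | h
      · subst h
        refine ⟨by simpa [List.isEmpty_iff] using hc, ?_⟩
        intro c hcm; exact hcur c (by simpa using hcm)
      · exact hacc t h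
  | cons c rest ih =>
    intro cur acc hacc hcur t ht
    rw [PySem.Chars.split₀.go] at ht
    by_cases hsp : PySem.Chars.isspace c
    · rw [if_pos hsp] at ht
      by_cases hc : cur.isEmpty
      · rw [if_pos hc] at ht
        exact ih [] acc hacc (by simp) t ht
      · rw [if_neg hc] at ht
        refine ih [] _ ?_ (by simp) t ht
        intro u hu
        rcases List.mem_cons.mp hu with h | h
        · subst h
          refine ⟨by simpa [List.isEmpty_iff] using hc, ?_⟩
          intro d hd; exact hcur d (by simpa using hd)
        · exact hacc u h
    · rw [if_neg hsp] at ht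
      refine ih (c :: cur) acc hacc ?_ t ht
      intro d hd
      rcases List.mem_cons.mp hd with h | h
      · subst h; simpa using hsp
      · exact hcur d h

lemma pv_splitOn_go_subset (sep : List Char) :
    ∀ (fuel : Nat) (l cur acc : _) (t : List Char) (c : Char),
    t ∈ PySem.Chars.splitOn.go sep fuel l cur acc → c ∈ t →
    (∃ u ∈ acc, c ∈ u) ∨ c ∈ cur ∨ c ∈ l := by
  intro fuel
  induction fuel with
  | zero =>
    intro l cur acc t c ht hc
    rw [PySem.Chars.splitOn.go] at ht
    simp only [List.mem_reverse, List.mem_cons] at ht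
    rcases ht with h | h
    · subst h
      rcases List.mem_append.mp hc with h | h
      · right; left; simpa using h
      · right; right; exact h
    · exact Or.inl ⟨t, h, hc⟩
  | succ fuel ih =>
    intro l cur acc t c ht hc
    cases l with
    | nil =>
      rw [PySem.Chars.splitOn.go] at ht
      simp only [List.mem_reverse, List.mem_cons] at ht
      rcases ht with h | h
      · subst h; right; left; simpa using hc
      · exact Or.inl ⟨t, h, hc⟩
      · omega
    | cons x rest =>
      rw [PySem.Chars.splitOn.go] at ht
      by_cases hpre : sep.isPrefixOf (x :: rest)
      · rw [if_pos hpre] at ht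
        rcases ih _ _ _ t c ht hc with ⟨u, hu, hcu⟩ | h | h
        · rcases List.mem_cons.mp hu with h | h
          · subst h; right; left; simpa using hcu
          · exact Or.inl ⟨u, h, hcu⟩
        · exact absurd h (List.not_mem_nil)
        · right; right; exact List.mem_of_mem_drop h
      · rw [if_neg hpre] at ht
        rcases ih _ _ _ t c ht hc with h | h | h
        · exact Or.inl h
        · rcases List.mem_cons.mp h with h | h
          · subst h; right; right; simp
          · right; left; exact h
        · right; right; exact List.mem_cons_of_mem _ h
lemma pv_join_chars_cons (sep x : List Char) :
    ∀ (r : List (List Char)), PySem.Chars.join sep (x :: r) = x ++ r.flatMap (fun p => sep ++ p) := by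
  intro r
  induction r generalizing x with
  | nil => simp [PySem.Chars.join_singleton]
  | cons y r ih => rw [PySem.Chars.join_cons_cons, ih y]; simp

-- the two directions separately (easier to use)
lemma pv_mem_join_of_mem {sep : List Char} {ps : List (List Char)} {p : List Char} {c : Char}
    (hp : p ∈ ps) (hc : c ∈ p) : c ∈ PySem.Chars.join sep ps := by
  cases ps with
  | nil => exact absurd hp (List.not_mem_nil)
  | cons x r =>
    rw [pv_join_chars_cons]
    rcases List.mem_cons.mp hp with h | h
    · subst h; exact List.mem_append.mpr (Or.inl hc)
    · refine List.mem_append.mpr (Or.inr ?_)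
      exact List.mem_flatMap.mpr ⟨p, h, List.mem_append.mpr (Or.inr hc)⟩

lemma pv_mem_join_imp {sep : List Char} {ps : List (List Char)} {c : Char}
    (h : c ∈ PySem.Chars.join sep ps) : c ∈ sep ∨ ∃ p ∈ ps, c ∈ p := by
  cases ps with
  | nil => simp [PySem.Chars.join_nil] at h
  | cons x r =>
    rw [pv_join_chars_cons] at h
    rcases List.mem_append.mp h with h | h
    · exact Or.inr ⟨x, by simp, h⟩
    · obtain ⟨p, hp, hcp⟩ := List.mem_flatMap.mp h
      rcases List.mem_append.mp hcp with h | h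
      · exact Or.inl h
      · exact Or.inr ⟨p, List.mem_cons_of_mem _ hp, h⟩

lemma pv_foldl_g_ne (ps : List String) :
    ∀ (acc : String), acc ≠ "" →
    (List.foldl pvG acc ps).toList = acc.toList ++ ps.flatMap (fun p => ' ' :: p.toList) := by
  induction ps with
  | nil => intro acc h; simp
  | cons p ps ih =>
    intro acc h
    simp only [List.foldl_cons]
    rw [show pvG acc p = pvFmt acc p by simp [pvG, h]]
    rw [ih _ (pv_fmt_ne acc p)]
    simp [pvFmt]

lemma pv_foldl_g_join (ps : List String) (h : ∀ p ∈ ps, p ≠ "") :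
    List.foldl pvG "" ps = PySem.Str.join " " ps := by
  apply String.toList_inj.mp
  rw [PySem.Str.toList_join]
  cases ps with
  | nil => simp [PySem.Chars.join_nil]
  | cons p ps =>
    simp only [List.foldl_cons]
    rw [show pvG "" p = p by simp [pvG]]
    by_cases hp : p = ""
    · exact absurd hp (h p (by simp))
    · rw [pv_foldl_g_ne ps p hp]
      rw [List.map_cons, pv_join_chars_cons]
      simp [List.flatMap_map]


lemma pv_cells_eq (t : String) :
    (PySem.Str.split? t "#").getD [] = List.map String.ofList (PySem.Chars.splitOn t.toList ['#']) := by
  simp [PySem.Str.split?, PySem.Chars.split?]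

lemma pv_pyGetD_neg2_short {cells : List String} (h : cells.length < 2) :
    PySem.List.pyGetD cells (-2) "" = "" := by
  rw [PySem.List.pyGetD_of_none]
  rw [PySem.List.pyGet?_eq_none_iff]
  unfold PySem.Raise.InRange
  simp
  omega

lemma pv_piece_good {t : String} (htc : pvClean t)
    (hmi : PySem.List.pyGetD ((PySem.Str.split? t "#").getD []) (-2) "" = "mi") :
    PySem.Str.join "#" (PySem.List.slice ((PySem.Str.split? t "#").getD []) none (some (-1))) ≠ "" ∧
    pvClean (PySem.Str.join "#" (PySem.List.slice ((PySem.Str.split? t "#").getD []) none (some (-1)))) := by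
  set cells := (PySem.Str.split? t "#").getD [] with hc
  have hlen : 2 ≤ cells.length := by
    by_contra hlt
    rw [pv_pyGetD_neg2_short (by omega)] at hmi
    exact absurd hmi (by decide)
  have hidx : cells[cells.length - 2]? = some "mi" := by
    rw [PySem.List.pyGetD_neg_ofNat cells 2 "" (by omega) (by omega)] at hmi
    rw [List.getElem?_eq_getElem (by omega)]
    exact congrArg some hmi
  have hmem : "mi" ∈ cells.dropLast := by
    have h2 : cells.length - 2 < cells.dropLast.length := by
      rw [List.length_dropLast]; omega
    have hEq : cells.dropLast[cells.length - 2] = cells[cells.length - 2]'(by omega) :=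
      List.getElem_dropLast h2
    have : cells[cells.length - 2]'(by omega) = "mi" := by
      rw [List.getElem?_eq_getElem (by omega)] at hidx
      exact Option.some.inj hidx
    rw [← this, ← hEq]
    exact List.getElem_mem h2
  rw [PySem.List.slice_to_neg_one]
  constructor
  · intro hjoin
    have : ('m' : Char) ∈ (PySem.Str.join "#" cells.dropLast).toList := by
      rw [PySem.Str.toList_join]
      exact pv_mem_join_of_mem (List.mem_map_of_mem hmem) (by decide)
    rw [hjoin] at this
    simp at this
  · intro c hcm
    rw [PySem.Str.toList_join] at hcm
    rcases pv_mem_join_imp hcm with h | ⟨p, hp, hcp⟩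
    · have : c = '#' := by simpa using h
      subst this; decide
    · obtain ⟨q, hq, rfl⟩ := List.mem_map.mp hp
      have hq' : q ∈ cells := List.dropLast_subset _ hq
      rw [hc, pv_cells_eq] at hq'
      obtain ⟨r, hr, rfl⟩ := List.mem_map.mp hq'
      rw [String.toList_ofList] at hcp
      have : c ∈ t.toList := by
        unfold PySem.Chars.splitOn at hr
        rcases pv_splitOn_go_subset ['#'] _ _ _ _ r c hr hcp with ⟨u, hu, _⟩ | h | h
        · exact absurd hu (List.not_mem_nil)
        · exact absurd h (List.not_mem_nil)
        · exact h
      exact htc c this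


lemma pvStepA_eq (st : String × String × String) (el : String) :
    pvStepA st el =
      if pvIsOp el then
        (PySem.Str.strip (pvFmt st.1 el), PySem.Str.strip (pvFmt st.2.1 el), st.2.2)
      else if pvIsArg el then
        if PySem.List.pyGetD ((PySem.Str.split? el "#").getD []) (-2) "" = "mi" then
          (st.1, PySem.Str.strip (pvFmt st.2.1
                (PySem.Str.join "#" (PySem.List.slice ((PySem.Str.split? el "#").getD []) none (some (-1))))),
           PySem.Str.strip (pvFmt st.2.2 el))
        else (st.1, st.2.1, PySem.Str.strip (pvFmt st.2.2 el))
      else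
        (PySem.Str.strip (pvFmt st.1 el), PySem.Str.strip (pvFmt st.2.1 el),
         PySem.Str.strip (pvFmt st.2.2 el)) := by
  obtain ⟨op, u, a⟩ := st
  simp only [pvStepA, pvIsOp, pvIsArg]

lemma pv_inner (ts : List String) (hts : ∀ t ∈ ts, t ≠ "" ∧ pvClean t) :
    ∀ o u a : String, pvEnds o → pvEnds u → pvEnds a →
    List.foldl pvStepA (o, u, a) ts =
      (List.foldl pvG o (ts.filter (fun t => pvIsOp t || !pvIsArg t)),
       List.foldl pvG u (ts.filterMap pvUnifPiece),
       List.foldl pvG a (ts.filter (fun t => !pvIsOp t))) := by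
  induction ts with
  | nil => intro o u a _ _ _; rfl
  | cons t ts ih =>
    intro o u a ho hu ha
    have ht0 : t ≠ "" := (hts t (by simp)).1
    have htc : pvClean t := (hts t (by simp)).2
    have hte : pvEnds t := pv_clean_ends htc
    have hts' : ∀ x ∈ ts, x ≠ "" ∧ pvClean x := fun x hx => hts x (List.mem_cons_of_mem _ hx)
    by_cases hop : pvIsOp t = true
    · have hfOp : (t :: ts).filter (fun t => pvIsOp t || !pvIsArg t)
          = t :: ts.filter (fun t => pvIsOp t || !pvIsArg t) := by
        rw [List.filter_cons, if_pos (by simp [hop])]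
      have hfArg : (t :: ts).filter (fun t => !pvIsOp t) = ts.filter (fun t => !pvIsOp t) := by
        rw [List.filter_cons, if_neg (by simp [hop])]
      have hfU : (t :: ts).filterMap pvUnifPiece = t :: ts.filterMap pvUnifPiece := by
        rw [List.filterMap_cons, show pvUnifPiece t = some t by rw [pvUnifPiece, if_pos hop]]
      rw [hfOp, hfArg, hfU, List.foldl_cons, List.foldl_cons, List.foldl_cons, pvStepA_eq]
      rw [if_pos hop]
      simp only
      rw [pv_strip_fmt ho hte ht0, pv_strip_fmt hu hte ht0]
      exact ih hts' _ _ _ (pv_g_ends ho hte ht0) (pv_g_ends hu hte ht0) ha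
    · have hop' : pvIsOp t = false := by simpa using hop
      have hfArg : (t :: ts).filter (fun t => !pvIsOp t) = t :: ts.filter (fun t => !pvIsOp t) := by
        rw [List.filter_cons, if_pos (by simp [hop'])]
      by_cases harg : pvIsArg t = true
      · have hfOp : (t :: ts).filter (fun t => pvIsOp t || !pvIsArg t)
            = ts.filter (fun t => pvIsOp t || !pvIsArg t) := by
          rw [List.filter_cons, if_neg (by simp [hop', harg])]
        by_cases hmi : PySem.List.pyGetD ((PySem.Str.split? t "#").getD []) (-2) "" = "mi"
        · obtain ⟨hpne, hpcl⟩ := pv_piece_good htc hmi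
          have hfU : (t :: ts).filterMap pvUnifPiece
              = (PySem.Str.join "#" (PySem.List.slice ((PySem.Str.split? t "#").getD []) none (some (-1))))
                :: ts.filterMap pvUnifPiece := by
            rw [List.filterMap_cons,
              show pvUnifPiece t = some (PySem.Str.join "#"
                (PySem.List.slice ((PySem.Str.split? t "#").getD []) none (some (-1)))) by
                rw [pvUnifPiece, if_neg (by simp [hop']), if_pos harg]
                simp only [hmi, if_pos]]
          rw [hfOp, hfArg, hfU, List.foldl_cons, List.foldl_cons, List.foldl_cons, pvStepA_eq]
          rw [if_neg (by simp [hop']), if_pos harg, if_pos hmi]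
          simp only
          rw [pv_strip_fmt hu (pv_clean_ends hpcl) hpne, pv_strip_fmt ha hte ht0]
          exact ih hts' _ _ _ ho (pv_g_ends hu (pv_clean_ends hpcl) hpne) (pv_g_ends ha hte ht0)
        · have hfU : (t :: ts).filterMap pvUnifPiece = ts.filterMap pvUnifPiece := by
            rw [List.filterMap_cons,
              show pvUnifPiece t = none by
                rw [pvUnifPiece, if_neg (by simp [hop']), if_pos harg]
                simp only [hmi, if_false]]
          rw [hfOp, hfArg, hfU, List.foldl_cons, List.foldl_cons, pvStepA_eq]
          rw [if_neg (by simp [hop']), if_pos harg, if_neg hmi]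
          simp only
          rw [pv_strip_fmt ha hte ht0]
          exact ih hts' _ _ _ ho hu (pv_g_ends ha hte ht0)
      · have harg' : pvIsArg t = false := by simpa using harg
        have hfOp : (t :: ts).filter (fun t => pvIsOp t || !pvIsArg t)
            = t :: ts.filter (fun t => pvIsOp t || !pvIsArg t) := by
          rw [List.filter_cons, if_pos (by simp [harg'])]
        have hfU : (t :: ts).filterMap pvUnifPiece = t :: ts.filterMap pvUnifPiece := by
          rw [List.filterMap_cons,
            show pvUnifPiece t = some t by
              rw [pvUnifPiece, if_neg (by simp [hop']), if_neg (by simp [harg'])]]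
        rw [hfOp, hfArg, hfU, List.foldl_cons, List.foldl_cons, List.foldl_cons, pvStepA_eq]
        rw [if_neg (by simp [hop']), if_neg (by simp [harg'])]
        simp only
        rw [pv_strip_fmt ho hte ht0, pv_strip_fmt hu hte ht0, pv_strip_fmt ha hte ht0]
        exact ih hts' _ _ _ (pv_g_ends ho hte ht0) (pv_g_ends hu hte ht0) (pv_g_ends ha hte ht0)



lemma pv_tokens_good {p t : String} (h : t ∈ PySem.Str.split₀ p) : t ≠ "" ∧ pvClean t := by
  rw [PySem.Str.split₀] at h
  obtain ⟨q, hq, rfl⟩ := List.mem_map.mp h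
  rw [PySem.Chars.split₀] at hq
  have := pv_split₀_go_clean p.toList [] [] (by simp) (by simp) q hq
  refine ⟨?_, ?_⟩
  · intro hh
    exact this.1 (by simpa using congrArg String.toList hh)
  · intro c hc
    rw [String.toList_ofList] at hc
    exact this.2 c hc

lemma pv_ends_empty : pvEnds "" := by
  constructor <;> intro c hc <;> simp [String.toList_empty] at hc

lemma pv_unifPiece_ne {t x : String} (ht0 : t ≠ "") (htc : pvClean t)
    (h : pvUnifPiece t = some x) : x ≠ "" := by
  rw [pvUnifPiece] at h
  by_cases h1 : pvIsOp t = true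
  · rw [if_pos h1] at h; exact (Option.some.inj h) ▸ ht0
  · rw [if_neg h1] at h
    by_cases h2 : pvIsArg t = true
    · rw [if_pos h2] at h
      simp only at h
      by_cases h3 : PySem.List.pyGetD ((PySem.Str.split? t "#").getD []) (-2) "" = "mi"
      · rw [if_pos h3] at h
        exact (Option.some.inj h) ▸ (pv_piece_good htc h3).1
      · rw [if_neg h3] at h; exact absurd h (by simp)
    · rw [if_neg h2] at h; exact (Option.some.inj h) ▸ ht0

lemma pv_foldl_g_ends {ps : List String} (h : ∀ p ∈ ps, p ≠ "" ∧ pvEnds p) :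
    ∀ {acc : String}, pvEnds acc → pvEnds (List.foldl pvG acc ps) := by
  induction ps with
  | nil => intro acc hacc; exact hacc
  | cons p ps ih =>
    intro acc hacc
    rw [List.foldl_cons]
    exact ih (fun x hx => h x (List.mem_cons_of_mem _ hx))
      (pv_g_ends hacc (h p (by simp)).2 (h p (by simp)).1)

-- the inner loop of A on one path computes exactly B's three joined strings
lemma pv_path (p : String) :
    (PySem.Str.split₀ p).foldl pvStepA ("", "", "") = (pvOpStr p, pvUnifStr p, pvArgStr p) := by
  have htok : ∀ t ∈ PySem.Str.split₀ p, t ≠ "" ∧ pvClean t := fun t ht => pv_tokens_good ht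
  rw [pv_inner _ htok "" "" "" pv_ends_empty pv_ends_empty pv_ends_empty]
  rw [pvOpStr, pvUnifStr, pvArgStr]
  rw [pv_foldl_g_join _ (fun x hx => (htok x (List.mem_of_mem_filter hx)).1)]
  rw [pv_foldl_g_join _ (fun x hx => by
    obtain ⟨t, ht, hsome⟩ := List.mem_filterMap.mp hx
    exact pv_unifPiece_ne (htok t ht).1 (htok t ht).2 hsome)]
  rw [pv_foldl_g_join _ (fun x hx => (htok x (List.mem_of_mem_filter hx)).1)]

lemma pv_str_ends_of_filter (p : String) (f : String → Bool) :
    pvEnds (List.foldl pvG "" ((PySem.Str.split₀ p).filter f)) :=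
  pv_foldl_g_ends (fun _ hx =>
    ⟨(pv_tokens_good (List.mem_of_mem_filter hx)).1,
     pv_clean_ends (pv_tokens_good (List.mem_of_mem_filter hx)).2⟩) pv_ends_empty

lemma pv_unifPiece_clean {t x : String} (htc : pvClean t)
    (h : pvUnifPiece t = some x) : pvClean x := by
  rw [pvUnifPiece] at h
  by_cases h1 : pvIsOp t = true
  · rw [if_pos h1] at h; exact (Option.some.inj h) ▸ htc
  · rw [if_neg h1] at h
    by_cases h2 : pvIsArg t = true
    · rw [if_pos h2] at h
      simp only at h
      by_cases h3 : PySem.List.pyGetD ((PySem.Str.split? t "#").getD []) (-2) "" = "mi"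
      · rw [if_pos h3] at h
        exact (Option.some.inj h) ▸ (pv_piece_good htc h3).2
      · rw [if_neg h3] at h; exact absurd h (by simp)
    · rw [if_neg h2] at h; exact (Option.some.inj h) ▸ htc

lemma pv_strip_opStr (p : String) : PySem.Str.strip (pvOpStr p) = pvOpStr p := by
  rw [pvOpStr,
    ← pv_foldl_g_join _ (fun x hx => (pv_tokens_good (List.mem_of_mem_filter hx)).1)]
  exact pv_strip_ends (pv_str_ends_of_filter p _)

lemma pv_strip_argStr (p : String) : PySem.Str.strip (pvArgStr p) = pvArgStr p := by
  rw [pvArgStr,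
    ← pv_foldl_g_join _ (fun x hx => (pv_tokens_good (List.mem_of_mem_filter hx)).1)]
  exact pv_strip_ends (pv_str_ends_of_filter p _)

lemma pv_strip_unifStr (p : String) : PySem.Str.strip (pvUnifStr p) = pvUnifStr p := by
  have hgood : ∀ x ∈ (PySem.Str.split₀ p).filterMap pvUnifPiece, x ≠ "" ∧ pvEnds x := by
    intro x hx
    obtain ⟨t, ht, hsome⟩ := List.mem_filterMap.mp hx
    obtain ⟨ht0, htc⟩ := pv_tokens_good ht
    exact ⟨pv_unifPiece_ne ht0 htc hsome, pv_clean_ends (pv_unifPiece_clean htc hsome)⟩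
  rw [pvUnifStr, ← pv_foldl_g_join _ (fun x hx => (hgood x hx).1)]
  exact pv_strip_ends (pv_foldl_g_ends hgood pv_ends_empty)

lemma pv_outer (paths : List String) : ∀ X Y Z : List String,
    paths.foldl (fun acc p =>
      match acc with
      | (ops, ops_unif, args) =>
        match (PySem.Str.split₀ p).foldl pvStepA ("", "", "") with
        | (op, op_unif, arg) =>
          (if PySem.Str.strip op ≠ "" then ops ++ [op] else ops,
           if PySem.Str.strip op_unif ≠ "" then ops_unif ++ [op_unif] else ops_unif,
           if PySem.Str.strip arg ≠ "" then args ++ [arg] else args)) (X, Y, Z)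
    = (X ++ paths.filterMap (fun p => if pvOpStr p = "" then none else some (pvOpStr p)),
       Y ++ paths.filterMap (fun p => if pvUnifStr p = "" then none else some (pvUnifStr p)),
       Z ++ paths.filterMap (fun p => if pvArgStr p = "" then none else some (pvArgStr p))) := by
  induction paths with
  | nil => intro X Y Z; simp
  | cons p ps ih =>
    intro X Y Z
    rw [List.foldl_cons]
    simp only [pv_path p]
    rw [ih]
    rw [pv_strip_opStr, pv_strip_unifStr, pv_strip_argStr]
    rw [List.filterMap_cons, List.filterMap_cons, List.filterMap_cons]
    refine Prod.ext ?_ (Prod.ext ?_ ?_) <;> simp only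
    · by_cases h : pvOpStr p = "" <;> simp [h]
    · by_cases h : pvUnifStr p = "" <;> simp [h]
    · by_cases h : pvArgStr p = "" <;> simp [h]

theorem pv_main (paths : List String) : get_op_arg_unif paths = get_op_arg_unif_alt paths := by
  rw [get_op_arg_unif, get_op_arg_unif_alt, pv_outer paths [] [] []]
  simp

-- ===== VERDICT (by name: the statement is the Claim_ definition above) =====
theorem get_op_arg_unif_spec : Claim_equal_get_op_arg_unif := by
  intro paths _
  unfold Spec_get_op_arg_unif
  exact pv_main paths
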